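-- pv_equiv track=rewrite | github.com/theabbie/leetcode | miscellaneous/A_Make_it_Beautiful.py | check
-- ===== SOURCE A (Python) =====
-- def check(arr):
--     n = len(arr)
--     p = [0] * (n + 1)
--     for i in range(n):
--         p[i + 1] += p[i] + arr[i]
--     for i in range(n):
--         if p[i] == arr[i]:
--             return False
--     return True
-- ===== SOURCE B (Python) =====
-- def check(arr):
--     total = sum(arr)
--     suffix = 0
--     for x in reversed(arr):
--         suffix += x
--         if total - suffix == x:
--             return False
--     return True
-- ===== Notes on version B (the rewrite author's own statement) =====
-- stated objective: alternative
-- what changed: Instead of building an (n+1)-entry prefix-sum table and rescanning it front-to-back, B scans the array back-to-front maintaining a suffix sum and recovers each prefix sum as total - suffix, so no table is allocated and the traversal order is opposite.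
import Mathlib
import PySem

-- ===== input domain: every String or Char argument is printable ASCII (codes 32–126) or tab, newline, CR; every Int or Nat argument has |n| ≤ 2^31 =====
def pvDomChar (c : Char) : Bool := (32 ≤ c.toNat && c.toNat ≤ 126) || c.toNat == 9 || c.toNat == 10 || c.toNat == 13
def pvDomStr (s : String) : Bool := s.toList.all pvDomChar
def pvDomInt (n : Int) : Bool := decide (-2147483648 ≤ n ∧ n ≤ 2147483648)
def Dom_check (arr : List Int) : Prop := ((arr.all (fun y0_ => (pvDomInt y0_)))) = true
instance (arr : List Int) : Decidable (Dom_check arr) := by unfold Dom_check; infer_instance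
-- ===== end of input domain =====

-- B drops A's prefix-sum table and forward rescan: it scans BACK-TO-FRONT keeping a suffix sum,
-- recovering each prefix sum as total - suffix (alternative decomposition, O(1) extra space).

-- ===== PORT A =====
-- 'for i in range(n): p[i+1] += p[i] + arr[i]'  (all indices are in range, so pyGetD's default is never used)
def checkStep (arr : List Int) (p : List Int) (i : Int) : List Int :=
  p.set (i + 1).toNat (PySem.List.pyGetD p (i + 1) 0 + (PySem.List.pyGetD p i 0 + PySem.List.pyGetD arr i 0))

-- 'for i in range(n): if p[i] == arr[i]: return False' then 'return True'
def checkScan (arr p : List Int) : List Int → Bool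
  | [] => true
  | i :: rest =>
      if PySem.List.pyGetD p i 0 = PySem.List.pyGetD arr i 0 then false
      else checkScan arr p rest

def check (arr : List Int) : Bool :=
  let n := arr.length
  let p := (PySem.List.pyRange 0 (n : Int) 1).foldl (checkStep arr) (List.replicate (n + 1) 0)
  checkScan arr p (PySem.List.pyRange 0 (n : Int) 1)

-- ===== PORT B =====
-- 'for x in reversed(arr): suffix += x; if total - suffix == x: return False' then 'return True'
def checkAltGo (total : Int) : Int → List Int → Bool
  | _, [] => true
  | suffix, x :: rest =>
      if total - (suffix + x) = x then false else checkAltGo total (suffix + x) rest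

def check_alt (arr : List Int) : Bool := checkAltGo arr.sum 0 arr.reverse

-- ===== PRECONDITION & SPEC =====
def Spec_check (arr : List Int) (out : Bool) : Prop := out = check_alt arr
instance (arr : List Int) (out : Bool) : Decidable (Spec_check arr out) := by unfold Spec_check; infer_instance

-- ===== CLAIM (what is proved, stated in full; the proofs are below) =====
def Claim_equal_check : Prop := ∀ (arr : List Int), Dom_check arr → Spec_check arr (check arr)

-- ===== LEMMAS AND PROOFS =====

def psum (arr : List Int) (k : Nat) : Int := (arr.take k).sum

lemma build_inv (arr t : List Int) :
    (PySem.List.pyRange 0 (arr.length : Int) 1).foldl (checkStep arr)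
        (List.replicate (arr.length + 1) 0 ++ t)
      = (List.range (arr.length + 1)).map (psum arr) ++ t := by
  induction arr using List.reverseRecOn generalizing t with
  | nil =>
      simp [PySem.List.pyRange_one_eq_nil, psum]
  | append_singleton arr x ih =>
      have hn : ((arr.length + 1 : Nat) : Int) = (arr.length : Int) + 1 := by push_cast; ring
      have hrange : PySem.List.pyRange 0 (((arr.length + 1 : Nat)) : Int) 1
          = PySem.List.pyRange 0 (arr.length : Int) 1 ++ [(arr.length : Int)] := by
        rw [hn, PySem.List.pyRange_one_succ_right (by positivity)]
      have hlen : (arr ++ [x]).length = arr.length + 1 := by simp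
      rw [hlen, hrange, List.foldl_append]
      have hrep : (List.replicate (arr.length + 1 + 1) (0:Int)) ++ t
          = List.replicate (arr.length + 1) 0 ++ (0 :: t) := by
        rw [@List.replicate_succ' (arr.length + 1)]
        simp
      rw [hrep]
      have hcong : (PySem.List.pyRange 0 (arr.length : Int) 1).foldl (checkStep (arr ++ [x]))
            (List.replicate (arr.length + 1) 0 ++ (0 :: t))
          = (PySem.List.pyRange 0 (arr.length : Int) 1).foldl (checkStep arr)
            (List.replicate (arr.length + 1) 0 ++ (0 :: t)) := by
        apply PySem.List.foldl_congr_mem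
        intro acc i hi
        obtain ⟨h0, h1⟩ := (PySem.List.mem_pyRange_one).1 hi
        have hgetd : PySem.List.pyGetD (arr ++ [x]) i 0 = PySem.List.pyGetD arr i 0 := by
          lift i to ℕ using h0 with j
          have hj : j < arr.length := by exact_mod_cast h1
          rw [PySem.List.pyGetD_natCast, PySem.List.pyGetD_natCast, List.getD_append _ _ _ _ hj]
        simp only [checkStep, hgetd]
      rw [hcong, ih (0 :: t)]
      have hL : ((List.range (arr.length + 1)).map (psum arr)).length = arr.length + 1 := by simp
      have h1 : PySem.List.pyGetD ((List.range (arr.length + 1)).map (psum arr) ++ 0 :: t)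
          ((arr.length : Int) + 1) 0 = 0 := by
        have : ((arr.length : Int) + 1) = ((arr.length + 1 : Nat) : Int) := by push_cast; ring
        rw [this, PySem.List.pyGetD_natCast, List.getD_append_right _ _ _ _ (by omega)]
        simp [hL]
      have h2 : PySem.List.pyGetD ((List.range (arr.length + 1)).map (psum arr) ++ 0 :: t)
          ((arr.length : Int)) 0 = arr.sum := by
        rw [PySem.List.pyGetD_natCast, List.getD_append _ _ _ _ (by omega),
          List.getD_eq_getElem?_getD, List.getElem?_map, List.getElem?_range (by omega)]
        simp [psum]
      have h3 : PySem.List.pyGetD (arr ++ [x]) ((arr.length : Int)) 0 = x := by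
        rw [PySem.List.pyGetD_natCast, List.getD_append_right _ _ _ _ (by omega)]
        simp
      simp only [List.foldl_cons, List.foldl_nil]
      simp only [checkStep]
      rw [h1, h2, h3]
      have htn : ((arr.length : Int) + 1).toNat = arr.length + 1 := by omega
      rw [htn, List.set_append_right _ _ (by rw [hL]), hL]
      have hset : ((0 :: t).set (arr.length + 1 - (arr.length + 1)) (0 + (arr.sum + x))) = (arr.sum + x) :: t := by
        simp
      rw [hset]
      have hmap : (List.range (arr.length + 1 + 1)).map (psum (arr ++ [x]))
          = (List.range (arr.length + 1)).map (psum arr) ++ [arr.sum + x] := by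
        rw [List.range_succ, List.map_append]
        congr 1
        · apply List.map_congr_left
          intro j hj
          have hj' : j ≤ arr.length := by
            have := List.mem_range.1 hj; omega
          unfold psum
          rw [List.take_append_of_le_length hj']
        · simp only [List.map_cons, List.map_nil, psum]
          rw [List.take_of_length_le (by simp)]
          simp
      rw [hmap]
      simp

-- A's scan (early-return loop) returns true iff no index in the list matches.
lemma scan_iff (arr p : List Int) (idxs : List Int) :
    checkScan arr p idxs = true ↔
      ∀ i ∈ idxs, PySem.List.pyGetD p i 0 ≠ PySem.List.pyGetD arr i 0 := by
  induction idxs with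
  | nil => simp [checkScan]
  | cons i rest ih =>
      rw [checkScan]
      by_cases h : PySem.List.pyGetD p i 0 = PySem.List.pyGetD arr i 0
      · simp [h]
      · simp [h, ih]

-- A returns true iff no prefix sum equals its element.
lemma check_iff (arr : List Int) :
    check arr = true ↔ ∀ i, (h : i < arr.length) → psum arr i ≠ arr[i] := by
  unfold check
  have hb := build_inv arr []
  simp only [List.append_nil] at hb
  simp only [hb, scan_iff]
  constructor
  · intro H i hi
    have hmem : ((i : Nat) : Int) ∈ PySem.List.pyRange 0 (arr.length : Int) 1 := by
      rw [PySem.List.mem_pyRange_one]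
      constructor <;> [positivity; exact_mod_cast hi]
    have := H _ hmem
    rwa [PySem.List.pyGetD_natCast, PySem.List.pyGetD_natCast,
      List.getD_eq_getElem?_getD, List.getElem?_map, List.getElem?_range (show i < arr.length + 1 by omega),
      List.getD_eq_getElem?_getD, List.getElem?_eq_getElem hi] at this
  · intro H i hmem
    obtain ⟨h0, h1⟩ := (PySem.List.mem_pyRange_one).1 hmem
    lift i to ℕ using h0 with j
    have hj : j < arr.length := by exact_mod_cast h1
    rw [PySem.List.pyGetD_natCast, PySem.List.pyGetD_natCast,
      List.getD_eq_getElem?_getD, List.getElem?_map, List.getElem?_range (show j < arr.length + 1 by omega),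
      List.getD_eq_getElem?_getD, List.getElem?_eq_getElem hj]
    exact H j hj

-- B's loop returns true iff no position in the remaining list trips the test.
lemma goAlt_iff (total : Int) (l : List Int) :
    ∀ suffix, checkAltGo total suffix l = true ↔
      ∀ j, (h : j < l.length) → total - (suffix + (l.take (j + 1)).sum) ≠ l[j] := by
  induction l with
  | nil => intro suffix; simp [checkAltGo]
  | cons x rest ih =>
      intro suffix
      rw [checkAltGo]
      by_cases h : total - (suffix + x) = x
      · simp only [if_pos h]
        constructor
        · intro h'; cases h'
        · intro H
          exact absurd h (by simpa using H 0 (by simp))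
      · simp only [if_neg h, ih (suffix + x)]
        constructor
        · intro H j hj
          cases j with
          | zero => simpa using h
          | succ j' =>
              have hj' : j' < rest.length := by simpa using hj
              have := H j' hj'
              simp only [List.take_succ_cons, List.sum_cons, List.getElem_cons_succ]
              convert this using 2
              ring
        · intro H j hj
          have := H (j + 1) (by simpa using Nat.succ_lt_succ hj)
          simp only [List.take_succ_cons, List.sum_cons, List.getElem_cons_succ] at this
          convert this using 2
          ring

-- B returns true iff no prefix sum equals its element.
lemma check_alt_iff (arr : List Int) :
    check_alt arr = true ↔ ∀ i, (h : i < arr.length) → psum arr i ≠ arr[i] := by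
  unfold check_alt
  rw [goAlt_iff]
  have key : ∀ j, (hj : j < arr.reverse.length) →
      ((arr.sum - (0 + (arr.reverse.take (j + 1)).sum) = arr.reverse[j]) ↔
        (psum arr (arr.length - 1 - j)
          = arr[arr.length - 1 - j]'(by rw [List.length_reverse] at hj; omega))) := by
    intro j hj
    have hj' : j < arr.length := by rw [List.length_reverse] at hj; exact hj
    have htake : arr.reverse.take (j + 1) = (arr.drop (arr.length - 1 - j)).reverse := by
      have hn : arr.length - (j + 1) = arr.length - 1 - j := by omega
      rw [List.take_reverse, hn]
    have hsum : (arr.drop (arr.length - 1 - j)).sum = arr.sum - psum arr (arr.length - 1 - j) := by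
      have := List.sum_take_add_sum_drop arr (arr.length - 1 - j)
      unfold psum
      omega
    rw [htake, List.sum_reverse, hsum, List.getElem_reverse]
    constructor <;> intro h <;> omega
  constructor
  · intro H i hi
    have hj : arr.length - 1 - i < arr.reverse.length := by rw [List.length_reverse]; omega
    have := (not_congr (key _ hj)).mp (H _ hj)
    have hidx : arr.length - 1 - (arr.length - 1 - i) = i := by omega
    simp only [hidx] at this
    exact this
  · intro H j hj
    have hj' : j < arr.length := by rw [List.length_reverse] at hj; exact hj
    exact (not_congr (key j hj)).mpr (H _ (by omega))

-- ===== VERDICT (by name: the statement is the Claim_ definition above) =====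
theorem check_spec : Claim_equal_check := by
  intro arr _
  unfold Spec_check
  have hA := check_iff arr
  have hB := check_alt_iff arr
  cases h1 : check arr <;> cases h2 : check_alt arr <;> simp_all
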